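-- pv_equiv track=rewrite | github.com/TianrenWang/Fall-2016-ITI1120-Assignment-5 | a5_part1_6040795.py | largest_34
-- ===== SOURCE A (Python) =====
-- def largest_34(a):
--     '''(list)->int
--     Returns the sum of the 3rd and 4th largest values in the list a
--     Precondition: a has at least 4 elements
--     '''
--
--     temp_list = []
--     for item in a:
--         temp_list.append(item)
--
--     biggest = max(temp_list)
--     temp_list.pop(temp_list.index(biggest))
--     second_biggest = max(temp_list)
--     temp_list.pop(temp_list.index(second_biggest))
--     third_biggest = max(temp_list)
--     temp_list.pop(temp_list.index(third_biggest))
--     fourth_biggest = max(temp_list)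
--     temp_list.pop(temp_list.index(fourth_biggest))
--     return fourth_biggest + third_biggest
-- ===== SOURCE B (Python) =====
-- def largest_34(a):
--     '''(list)->int
--     Returns the sum of the 3rd and 4th largest values in the list a
--     Precondition: a has at least 4 elements
--     '''
--     s = sorted(a, reverse=True)
--     return s[2] + s[3]
-- ===== Notes on version B (the rewrite author's own statement) =====
-- stated objective: simpler
-- what changed: Replaces the copy plus four repeated max/index/pop scans with a single descending sort and direct indexing s[2]+s[3].
import Mathlib
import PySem

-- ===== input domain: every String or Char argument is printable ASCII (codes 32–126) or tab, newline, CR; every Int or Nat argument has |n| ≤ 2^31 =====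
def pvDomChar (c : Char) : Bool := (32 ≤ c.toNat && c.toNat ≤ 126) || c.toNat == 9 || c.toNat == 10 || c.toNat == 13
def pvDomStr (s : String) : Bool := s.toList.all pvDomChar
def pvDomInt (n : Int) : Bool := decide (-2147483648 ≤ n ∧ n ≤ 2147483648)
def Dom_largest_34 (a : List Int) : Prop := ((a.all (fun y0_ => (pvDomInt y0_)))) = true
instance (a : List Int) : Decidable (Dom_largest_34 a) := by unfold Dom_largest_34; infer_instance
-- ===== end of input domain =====

-- B replaces A's copy plus four max/index/pop scans with one descending sort and s[2] + s[3]; equal return values, and B (unlike A) does not mutate anything (A only mutates its private copy, so no observable side effect either way).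

-- ===== PORT A =====
-- One 'biggest = max(temp_list); temp_list.pop(temp_list.index(biggest))' step of A:
-- returns (biggest, list after the pop). The none branches are where Python raises
-- (max of empty list) or are unreachable (index/pop of a present element); Pre_ excludes them.
def pvStepA (l : List Int) : Int × List Int :=
  match PySem.List.max? l (fun x => x) with
  | none => (0, l)          -- max([]) raises ValueError; excluded by Pre_
  | some m =>
    match PySem.List.index? l m with
    | none => (m, l)        -- unreachable: m ∈ l
    | some i =>
      match PySem.List.pop? l (i : Int) with
      | none => (m, l)      -- unreachable: i is a valid index
      | some r => (m, r.2)

def largest_34 (a : List Int) : Int :=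
  let temp0 := a.foldl (fun acc x => acc ++ [x]) []   -- temp_list built by the append loop
  let r1 := pvStepA temp0   -- biggest
  let r2 := pvStepA r1.2    -- second_biggest
  let r3 := pvStepA r2.2    -- third_biggest
  let r4 := pvStepA r3.2    -- fourth_biggest
  r4.1 + r3.1               -- fourth_biggest + third_biggest

-- ===== PORT B =====
def largest_34_alt (a : List Int) : Int :=
  let s := PySem.List.sorted a (fun x => x) true
  match PySem.List.pyGet? s 2, PySem.List.pyGet? s 3 with
  | some x, some y => x + y
  | _, _ => 0               -- IndexError on fewer than 4 elements; excluded by Pre_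

-- ===== PRECONDITION & SPEC =====
-- A raises ValueError (max of an empty list) when a has fewer than 4 elements (the
-- function's stated precondition); exactly those inputs are excluded.
def Pre_largest_34 (a : List Int) : Prop := 4 ≤ a.length
instance (a : List Int) : Decidable (Pre_largest_34 a) := by unfold Pre_largest_34; infer_instance
def pvWitness_largest_34 : List Int := [1, 2, 3, 4]

def Spec_largest_34 (a : List Int) (out : Int) : Prop := out = largest_34_alt a
instance (a : List Int) (out : Int) : Decidable (Spec_largest_34 a out) := by unfold Spec_largest_34; infer_instance

-- ===== CLAIM (what is proved, stated in full; the proofs are below) =====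
def Claim_equal_largest_34 : Prop := ∀ (a : List Int), Dom_largest_34 a → Pre_largest_34 a → Spec_largest_34 a (largest_34 a)

-- ===== LEMMAS AND PROOFS =====

-- One A-step on a list whose descending sort is m :: t pops the maximum m (first
-- occurrence), and the remaining list sorts (descending) to exactly t.
lemma pvStepA_eq (l : List Int) (m : Int) (t : List Int)
    (h : PySem.List.sorted l (fun x => x) true = m :: t) :
    pvStepA l = (m, l.erase m) ∧ PySem.List.sorted (l.erase m) (fun x => x) true = t := by
  have hmem : m ∈ l := (PySem.List.mem_sorted l _ true m).1 (h ▸ List.mem_cons_self)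
  -- max? returns m
  have hmax : PySem.List.max? l (fun x => x) = some m := by
    cases hm : PySem.List.max? l (fun x => x) with
    | none =>
        have : l = [] := (PySem.List.max?_eq_none_iff l _).1 hm
        simp [this] at hmem
    | some m0 =>
        have h1 : m0 ≤ m :=
          PySem.List.key_head_sorted_rev_ge l (fun x => x) h m0 (PySem.List.max?_mem hm)
        have h2 : m ≤ m0 := PySem.List.max?_isMax hm m hmem
        rw [le_antisymm h1 h2]
  -- index? returns some i with i < l.length, and eraseIdx i = erase m
  obtain ⟨i, hidx⟩ : ∃ i, PySem.List.index? l m = some i := by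
    cases hix : PySem.List.index? l m with
    | none =>
        rw [PySem.List.index?_eq_idxOf?] at hix
        exact absurd (List.idxOf?_eq_none_iff.1 hix) (by simp [hmem])
    | some i => exact ⟨i, rfl⟩
  obtain ⟨pre, suf, hsplit, hlen, -⟩ := (PySem.List.index?_eq_some_iff l m i).1 hidx
  have hilt : i < l.length := by rw [hsplit]; simp [← hlen]
  have herase : l.eraseIdx i = l.erase m := by
    rw [List.erase_eq_eraseIdx, ← PySem.List.index?_eq_idxOf?, hidx]
  have hstep : pvStepA l = (m, l.erase m) := by
    unfold pvStepA
    simp only [hmax, hidx, PySem.List.pop?_natCast l i hilt, herase]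
  refine ⟨hstep, ?_⟩
  -- the remaining list sorts to t
  have hperm : (l.erase m).Perm t := by
    have hl : l.Perm (m :: t) := (h ▸ (PySem.List.sorted_perm l (fun x => x) true)).symm
    have := hl.erase m
    simpa using this
  have hpw_t : List.Pairwise (fun a b : Int => b ≤ a) t := by
    have := PySem.List.sorted_pairwise_rev l (fun x : Int => x)
    rw [h] at this
    exact this.of_cons
  have hpw_s : List.Pairwise (fun a b : Int => b ≤ a)
      (PySem.List.sorted (l.erase m) (fun x => x) true) :=
    PySem.List.sorted_pairwise_rev _ _
  refine PySem.List.eq_of_perm_of_pairwise_le_of_injective (fun x : Int => -x)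
    neg_injective ((PySem.List.sorted_perm _ _ _).trans hperm) ?_ ?_
  · exact hpw_s.imp (fun hab => by simpa using hab)
  · exact hpw_t.imp (fun hab => by simpa using hab)

-- ===== VERDICT (by name: the statement is the Claim_ definition above) =====
theorem largest_34_spec : Claim_equal_largest_34 := by
  intro a _ hpre
  unfold Spec_largest_34 largest_34 largest_34_alt
  have hlen : (PySem.List.sorted a (fun x : Int => x) true).length = a.length :=
    PySem.List.length_sorted a _ _
  rcases hs : PySem.List.sorted a (fun x : Int => x) true with _ | ⟨s0, _ | ⟨s1, _ | ⟨s2, _ | ⟨s3, rest⟩⟩⟩⟩ <;>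
    rw [hs] at hlen <;>
    first
      | (exfalso; unfold Pre_largest_34 at hpre; simp at hlen; omega)
      | skip
  obtain ⟨h1, hsort1⟩ := pvStepA_eq a s0 _ hs
  obtain ⟨h2, hsort2⟩ := pvStepA_eq _ s1 _ hsort1
  obtain ⟨h3, hsort3⟩ := pvStepA_eq _ s2 _ hsort2
  obtain ⟨h4, _⟩ := pvStepA_eq _ s3 _ hsort3
  simp only [PySem.List.foldl_append_singleton, List.nil_append, h1, h2, h3, h4]
  simp only [PySem.List.pyGet?, PySem.List.pyIdx?]
  simp
  rw [if_pos (by omega : (2 : Int) ≤ (rest.length : Int) + 1 + 1 + 1),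
      if_pos (by omega : (3 : Int) ≤ (rest.length : Int) + 1 + 1 + 1)]
  simp
  ring
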